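-- pv_equiv track=rewrite | github.com/AndreaGStine/Pr-j-ct_--l-r | Problem_51.py | prime_is_eligible
-- ===== SOURCE A (Python) =====
-- def prime_is_eligible(n = 56004,s=[]):
--     try:
--         if s[n] == False:
--             return False
--         if n < 56003:
--             return False
--
--         converted = list(str(n))
--         for i in range(0, len(converted) - 1):
--             t = 1
--             for j in range(i + 1, len(converted) - 1):
--                 if converted[i] == converted[j]:
--                     t += 1
--             if t >= 3:
--                 return True
--         return False
--     except:
--         return False
-- ===== SOURCE B (Python) =====
-- def prime_is_eligible(n = 56004, s=[]):
--     try: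
--         if s[n] == False:
--             return False
--         if n < 56003:
--             return False
--     except:
--         return False
--     counts = {}
--     for ch in str(n)[:-1]:
--         counts[ch] = counts.get(ch, 0) + 1
--     return any(c >= 3 for c in counts.values())
-- ===== Notes on version B (the rewrite author's own statement) =====
-- stated objective: alternative
-- what changed: Replaced the nested pairwise index scan over the digits with a single counting pass that builds a digit frequency table and checks any count >= 3 (still over str(n)[:-1], preserving the last-digit exclusion).
import Mathlib
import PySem

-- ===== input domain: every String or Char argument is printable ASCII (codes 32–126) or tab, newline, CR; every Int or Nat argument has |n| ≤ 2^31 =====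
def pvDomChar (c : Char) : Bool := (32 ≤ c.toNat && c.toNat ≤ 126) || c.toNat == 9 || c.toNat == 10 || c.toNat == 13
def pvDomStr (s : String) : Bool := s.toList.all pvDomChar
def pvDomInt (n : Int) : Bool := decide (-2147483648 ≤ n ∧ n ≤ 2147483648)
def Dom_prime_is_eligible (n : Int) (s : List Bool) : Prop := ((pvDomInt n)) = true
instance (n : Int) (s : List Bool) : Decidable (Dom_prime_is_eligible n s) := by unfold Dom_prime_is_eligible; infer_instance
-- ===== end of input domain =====

-- B replaces A's nested pairwise digit scan with one counting pass building a frequency table (alternative decomposition; same return value, incl. A's exclusion of the last digit).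


-- ===== PORT A =====
-- inner loop: for j in range(i+1, len(converted)-1): if converted[i] == converted[j]: t += 1
def pieInner (conv : List Char) (i : Int) : List Int → Int → Int
  | [], t => t
  | j :: js, t =>
      pieInner conv i js (if PySem.List.pyGet? conv i = PySem.List.pyGet? conv j then t + 1 else t)

-- outer loop: for i in range(0, len(converted)-1): t = 1; …; if t >= 3: return True
def pieOuter (conv : List Char) : List Int → Bool
  | [] => false
  | i :: is =>
      let t := pieInner conv i (PySem.List.pyRange (i + 1) ((conv.length : Int) - 1) 1) 1
      if 3 ≤ t then true else pieOuter conv is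

def prime_is_eligible (n : Int) (s : List Bool) : Bool :=
  match PySem.List.pyGet? s n with
  | none => false            -- s[n] IndexError → bare except → return False
  | some v =>
      if v = false then false
      else if n < 56003 then false
      else
        let converted := (PySem.Int.toStr n).toList
        pieOuter converted (PySem.List.pyRange 0 ((converted.length : Int) - 1) 1)

-- ===== PORT B =====
def prime_is_eligible_alt (n : Int) (s : List Bool) : Bool :=
  match PySem.List.pyGet? s n with
  | none => false            -- s[n] IndexError → except → return False
  | some v =>
      if v = false then false
      else if n < 56003 then false
      else
        let digits := PySem.List.slice (PySem.Int.toStr n).toList none (some (-1))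
        let counts := digits.foldl (fun d ch => d.insert ch (d.getD ch 0 + 1))
          (PySem.Dict.empty : PySem.Dict Char Int)
        counts.values.any (fun c => 3 ≤ c)

-- ===== PRECONDITION & SPEC =====
def Spec_prime_is_eligible (n : Int) (s : List Bool) (out : Bool) : Prop := out = prime_is_eligible_alt n s
instance (n : Int) (s : List Bool) (out : Bool) : Decidable (Spec_prime_is_eligible n s out) := by unfold Spec_prime_is_eligible; infer_instance

-- ===== CLAIM (what is proved, stated in full; the proofs are below) =====
def Claim_equal_prime_is_eligible : Prop := ∀ (n : Int) (s : List Bool), Dom_prime_is_eligible n s → Spec_prime_is_eligible n s (prime_is_eligible n s)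

-- ===== LEMMAS AND PROOFS =====

-- A's inner loop adds to t the number of later occurrences (among the non-final digits) of conv[i]
theorem pieInner_eq (conv : List Char) (i : Nat) (hi : i < conv.length) (a : Nat) (t : Int) :
    pieInner conv (i : Int) (PySem.List.pyRange ((a : Int)) ((conv.length : Int) - 1) 1) t
      = t + ((conv.dropLast.drop a).count conv[i]) := by
  by_cases h : (a : Int) < (conv.length : Int) - 1
  · rw [PySem.List.pyRange_one_cons h]
    have ha : a < conv.dropLast.length := by
      rw [List.length_dropLast]; omega
    have key := pieInner_eq conv i hi (a + 1)
      (if PySem.List.pyGet? conv (i : Int) = PySem.List.pyGet? conv ((a : Int)) then t + 1 else t)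
    have hcast : ((a : Int)) + 1 = (((a + 1 : Nat) : Int)) := by push_cast; ring
    have hdrop : conv.dropLast.drop a = conv.dropLast[a] :: conv.dropLast.drop (a + 1) :=
      List.drop_eq_getElem_cons ha
    have hga : PySem.List.pyGet? conv ((a : Int)) = some conv[a] :=
      PySem.List.pyGet?_ofNat conv a (by omega)
    have hgi : PySem.List.pyGet? conv ((i : Int)) = some conv[i] :=
      PySem.List.pyGet?_ofNat conv i hi
    rw [pieInner, hcast, key, hdrop, List.count_cons, List.getElem_dropLast, hga, hgi]
    simp only [Option.some.injEq]
    split_ifs with h1 h2 h2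
    · push_cast; ring
    · exact absurd (beq_of_eq h1.symm) h2
    · exact absurd (beq_iff_eq.mp h2).symm h1
    · push_cast; ring
  · rw [PySem.List.pyRange_one_eq_nil (le_of_not_gt h)]
    have : conv.dropLast.drop a = [] := by
      apply List.drop_eq_nil_of_le
      rw [List.length_dropLast]; omega
    simp [pieInner, this]
termination_by conv.length - a
decreasing_by omega

-- A's outer loop returns True iff some non-final digit position has ≥ 2 later non-final duplicates
theorem pieOuter_eq (conv : List Char) (a : Nat) :
    pieOuter conv (PySem.List.pyRange ((a : Int)) ((conv.length : Int) - 1) 1) = true ↔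
      ∃ i, ∃ h : i < conv.dropLast.length, a ≤ i ∧
        3 ≤ 1 + ((conv.dropLast.drop (i + 1)).count conv.dropLast[i]) := by
  have hlen : conv.dropLast.length = conv.length - 1 := List.length_dropLast
  by_cases h : (a : Int) < (conv.length : Int) - 1
  · have ha : a < conv.dropLast.length := by omega
    have ha' : a < conv.length := by omega
    rw [PySem.List.pyRange_one_cons h]
    have hcast : ((a : Int)) + 1 = (((a + 1 : Nat) : Int)) := by push_cast; ring
    have hkey : pieInner conv ((a : Int)) (PySem.List.pyRange ((a : Int) + 1) ((conv.length : Int) - 1) 1) 1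
        = 1 + ((conv.dropLast.drop (a + 1)).count conv[a]) := by
      rw [hcast]; exact pieInner_eq conv a ha' (a + 1) 1
    have ih := pieOuter_eq conv (a + 1)
    rw [pieOuter, hkey]
    split_ifs with h3
    · simp only [true_iff]
      refine ⟨a, ha, le_refl a, ?_⟩
      rw [List.getElem_dropLast]
      omega
    · rw [hcast, ih]
      constructor
      · rintro ⟨i, hi, hai, hP⟩
        exact ⟨i, hi, by omega, hP⟩
      · rintro ⟨i, hi, hai, hP⟩
        refine ⟨i, hi, ?_, hP⟩
        rcases Nat.eq_or_lt_of_le hai with rfl | hlt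
        · exfalso
          rw [List.getElem_dropLast] at hP
          omega
        · omega
  · rw [PySem.List.pyRange_one_eq_nil (le_of_not_gt h)]
    simp only [pieOuter]
    constructor
    · intro hf; cases hf
    · rintro ⟨i, hi, hai, -⟩; omega
termination_by conv.length - a
decreasing_by omega

-- nothing equal to c occurs strictly before the first occurrence of c
theorem not_mem_take_idxOf {α : Type} [BEq α] [LawfulBEq α] (c : α) : ∀ (l : List α), c ∉ l.take (List.idxOf c l) := by
  intro l
  induction l with
  | nil => simp
  | cons b l ih =>
      by_cases h : b == c
      · simp [List.idxOf_cons, h]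
      · simp only [List.idxOf_cons, h, cond_false, List.take_succ_cons, List.mem_cons]
        rintro (rfl | hm)
        · exact h (beq_self_eq_true c)
        · exact ih hm

-- positional formulation (some position with ≥ 2 later duplicates) ↔ global count ≥ 3
theorem exists_idx_iff_count (d : List Char) :
    (∃ i, ∃ h : i < d.length, 3 ≤ 1 + ((d.drop (i + 1)).count d[i])) ↔
      ∃ c ∈ d, 3 ≤ d.count c := by
  constructor
  · rintro ⟨i, hi, hP⟩
    refine ⟨d[i], List.getElem_mem hi, ?_⟩
    have hsplit : d = d.take (i + 1) ++ d.drop (i + 1) := (List.take_append_drop (i + 1) d).symm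
    have hmem : d[i] ∈ d.take (i + 1) := by
      rw [List.mem_take_iff_getElem]
      exact ⟨i, by omega, rfl⟩
    have h1 : 1 ≤ (d.take (i + 1)).count d[i] := List.one_le_count_iff.mpr hmem
    calc 3 ≤ 1 + (d.drop (i + 1)).count d[i] := hP
      _ ≤ (d.take (i + 1)).count d[i] + (d.drop (i + 1)).count d[i] := by omega
      _ = d.count d[i] := by rw [← List.count_append, ← hsplit]
  · rintro ⟨c, hc, h3⟩
    have hi : List.idxOf c d < d.length := List.idxOf_lt_length_of_mem hc
    refine ⟨List.idxOf c d, hi, ?_⟩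
    have hdi0 : d[List.idxOf c d]'hi = c := List.getElem_idxOf hi
    have htake0 : (d.take (List.idxOf c d)).count c = 0 :=
      List.count_eq_zero.mpr (not_mem_take_idxOf c d)
    generalize hidef : List.idxOf c d = i at hi hdi0 htake0 ⊢
    have hdi : d[i] = c := hdi0
    have htake : (d.take i).count c = 0 := htake0
    have hdropi : d.drop i = d[i] :: d.drop (i + 1) := List.drop_eq_getElem_cons hi
    have hsplit : d.count c = (d.take i).count c + (d.drop i).count c := by
      rw [← List.count_append, List.take_append_drop]
    rw [hdi]
    rw [hsplit, htake, hdropi, List.count_cons, hdi] at h3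
    simp at h3
    omega

-- B's frequency-table check says exactly "some digit occurs ≥ 3 times"
theorem alt_core_eq (d : List Char) :
    ((d.foldl (fun dd ch => dd.insert ch (dd.getD ch 0 + 1)) (PySem.Dict.empty : PySem.Dict Char Int)).values.any
      (fun c => 3 ≤ c)) = true ↔ ∃ c ∈ d, 3 ≤ d.count c := by
  rw [show (d.foldl (fun dd ch => dd.insert ch (dd.getD ch 0 + 1)) (PySem.Dict.empty : PySem.Dict Char Int))
        = PySem.Dict.counter d from PySem.Dict.foldl_insert_getD_add_one_eq_counter d]
  simp only [PySem.Dict.values, PySem.Dict.items_counter, List.map_map, List.any_eq_true,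
    List.mem_map, Function.comp]
  constructor
  · rintro ⟨c, ⟨k, hk, rfl⟩, h3⟩
    exact ⟨k, (PySem.Set.mem_ofList _ _).mp hk, by exact_mod_cast of_decide_eq_true h3⟩
  · rintro ⟨c, hc, h3⟩
    exact ⟨(d.count c : Int), ⟨c, (PySem.Set.mem_ofList _ _).mpr hc, rfl⟩,
      decide_eq_true (by exact_mod_cast h3)⟩

-- the two digit-analysis cores agree
theorem core_eq (conv : List Char) :
    pieOuter conv (PySem.List.pyRange 0 ((conv.length : Int) - 1) 1)
      = ((conv.dropLast.foldl (fun dd ch => dd.insert ch (dd.getD ch 0 + 1))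
          (PySem.Dict.empty : PySem.Dict Char Int)).values.any (fun c => 3 ≤ c)) := by
  rw [Bool.eq_iff_iff]
  have h0 := pieOuter_eq conv 0
  rw [Nat.cast_zero] at h0
  rw [h0, alt_core_eq]
  rw [← exists_idx_iff_count conv.dropLast]
  constructor
  · rintro ⟨i, hi, -, hP⟩; exact ⟨i, hi, hP⟩
  · rintro ⟨i, hi, hP⟩; exact ⟨i, hi, Nat.zero_le i, hP⟩

-- ===== VERDICT (by name: the statement is the Claim_ definition above) =====
theorem prime_is_eligible_spec : Claim_equal_prime_is_eligible := by
  intro n s _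
  unfold Spec_prime_is_eligible prime_is_eligible prime_is_eligible_alt
  cases h : PySem.List.pyGet? s n with
  | none => rfl
  | some v =>
      cases v with
      | false => rfl
      | true =>
          simp only [Bool.true_eq_false, if_false]
          by_cases hn : n < 56003 <;> simp only [hn, if_true, if_false]
          rw [PySem.List.slice_to_neg_one]
          exact core_eq (PySem.Int.toStr n).toList
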